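-- pv_equiv track=rewrite | github.com/mdtahsinamin/Digital_Image_Processing_Lab | histogram_equal.py | compute_custom_hist
-- ===== SOURCE A (Python) =====
-- bin_edges = list(range(0, 256, 10)) + [256]
--
-- bin_labels = [f"{bin_edges[i]}-{bin_edges[i+1]-1}" for i in range(len(bin_edges)-1)]
--
-- def compute_custom_hist(flat_data):
--     bins = [0] * len(bin_labels)
--     for val in flat_data:
--         for i in range(len(bin_edges)-1):
--             if bin_edges[i] <= val < bin_edges[i+1]:
--                 bins[i] += 1
--                 break
--     return bins
-- ===== SOURCE B (Python) =====
-- bin_edges = list(range(0, 256, 10)) + [256]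
--
-- bin_labels = [f"{bin_edges[i]}-{bin_edges[i+1]-1}" for i in range(len(bin_edges)-1)]
--
-- def compute_custom_hist(flat_data):
--     # Direct arithmetic binning: compute each value's bin index in O(1)
--     # instead of scanning the 26 edges; values outside [0, 256) are skipped.
--     bins = [0] * len(bin_labels)
--     for val in flat_data:
--         if 0 <= val < 256:
--             bins[min(val // 10, 25)] += 1
--     return bins
-- ===== Notes on version B (the rewrite author's own statement) =====
-- stated objective: faster
-- what changed: Replaces A's per-value linear scan over the 26 bin edges (with break) by a direct O(1) arithmetic bin-index computation min(val // 10, 25) guarded by 0 <= val < 256.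
import Mathlib
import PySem

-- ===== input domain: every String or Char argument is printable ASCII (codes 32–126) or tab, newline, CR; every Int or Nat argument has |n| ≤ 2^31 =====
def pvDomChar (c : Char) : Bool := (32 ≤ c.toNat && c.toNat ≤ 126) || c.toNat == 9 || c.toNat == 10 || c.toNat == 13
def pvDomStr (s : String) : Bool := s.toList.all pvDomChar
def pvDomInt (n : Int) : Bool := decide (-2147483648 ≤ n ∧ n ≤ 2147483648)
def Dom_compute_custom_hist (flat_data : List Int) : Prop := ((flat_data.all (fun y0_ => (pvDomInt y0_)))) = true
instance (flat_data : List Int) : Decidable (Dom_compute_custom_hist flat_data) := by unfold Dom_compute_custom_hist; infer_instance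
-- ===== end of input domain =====

-- B replaces A's per-value scan over the 26 bin edges by a direct O(1) arithmetic
-- bin-index computation (objective: faster inner mechanism, same results).

-- ===== PORT A =====
-- bin_edges = list(range(0, 256, 10)) + [256]
def binEdges : List Int := PySem.List.pyRange 0 256 10 ++ [256]

-- len(bin_labels) = len(bin_edges) - 1 = 26
-- the inner 'for i in range(len(bin_edges)-1)' with break; i is always a valid
-- nonnegative index into bin_edges, so pyGetD/pySetD are exact here
def histInnerA (bins : List Int) (val : Int) : List Int → List Int
  | [] => bins
  | i :: rest =>
      if PySem.List.pyGetD binEdges i 0 ≤ val ∧ val < PySem.List.pyGetD binEdges (i + 1) 0 then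
        PySem.List.pySetD bins i (PySem.List.pyGetD bins i 0 + 1)
      else histInnerA bins val rest

def compute_custom_hist (flat_data : List Int) : List Int :=
  flat_data.foldl (fun bins val => histInnerA bins val (PySem.List.pyRange 0 26 1))
    (List.replicate 26 0)

-- ===== PORT B =====
-- bins[min(val // 10, 25)] += 1 ; the index is in [0, 26) inside the guard,
-- so pyGetD/pySetD are exact
def histStepB (bins : List Int) (val : Int) : List Int :=
  if 0 ≤ val ∧ val < 256 then
    let idx := min (PySem.Int.floordiv val 10) 25
    PySem.List.pySetD bins idx (PySem.List.pyGetD bins idx 0 + 1)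
  else bins

def compute_custom_hist_alt (flat_data : List Int) : List Int :=
  flat_data.foldl histStepB (List.replicate 26 0)

-- ===== PRECONDITION & SPEC =====
def Spec_compute_custom_hist (flat_data : List Int) (out : List Int) : Prop := out = compute_custom_hist_alt flat_data
instance (flat_data : List Int) (out : List Int) : Decidable (Spec_compute_custom_hist flat_data out) := by unfold Spec_compute_custom_hist; infer_instance

-- ===== CLAIM (what is proved, stated in full; the proofs are below) =====
def Claim_equal_compute_custom_hist : Prop := ∀ (flat_data : List Int), Dom_compute_custom_hist flat_data → Spec_compute_custom_hist flat_data (compute_custom_hist flat_data)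

-- ===== LEMMAS AND PROOFS =====

theorem set_incr_congr (bins : List Int) (i j : Int) (h : i = j) :
    PySem.List.pySetD bins i (PySem.List.pyGetD bins i 0 + 1)
      = PySem.List.pySetD bins j (PySem.List.pyGetD bins j 0 + 1) := by
  rw [h]

set_option maxHeartbeats 2000000 in
theorem step_eq (bins : List Int) (val : Int) :
    histInnerA bins val (PySem.List.pyRange 0 26 1) = histStepB bins val := by
  have hr : PySem.List.pyRange 0 26 1 =
      [0,1,2,3,4,5,6,7,8,9,10,11,12,13,14,15,16,17,18,19,20,21,22,23,24,25] := by decide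
  have e0 : PySem.List.pyGetD binEdges 0 0 = 0 := by decide
  have f0 : PySem.List.pyGetD binEdges (0 + 1) 0 = 10 := by decide
  have e1 : PySem.List.pyGetD binEdges 1 0 = 10 := by decide
  have f1 : PySem.List.pyGetD binEdges (1 + 1) 0 = 20 := by decide
  have e2 : PySem.List.pyGetD binEdges 2 0 = 20 := by decide
  have f2 : PySem.List.pyGetD binEdges (2 + 1) 0 = 30 := by decide
  have e3 : PySem.List.pyGetD binEdges 3 0 = 30 := by decide
  have f3 : PySem.List.pyGetD binEdges (3 + 1) 0 = 40 := by decide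
  have e4 : PySem.List.pyGetD binEdges 4 0 = 40 := by decide
  have f4 : PySem.List.pyGetD binEdges (4 + 1) 0 = 50 := by decide
  have e5 : PySem.List.pyGetD binEdges 5 0 = 50 := by decide
  have f5 : PySem.List.pyGetD binEdges (5 + 1) 0 = 60 := by decide
  have e6 : PySem.List.pyGetD binEdges 6 0 = 60 := by decide
  have f6 : PySem.List.pyGetD binEdges (6 + 1) 0 = 70 := by decide
  have e7 : PySem.List.pyGetD binEdges 7 0 = 70 := by decide
  have f7 : PySem.List.pyGetD binEdges (7 + 1) 0 = 80 := by decide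
  have e8 : PySem.List.pyGetD binEdges 8 0 = 80 := by decide
  have f8 : PySem.List.pyGetD binEdges (8 + 1) 0 = 90 := by decide
  have e9 : PySem.List.pyGetD binEdges 9 0 = 90 := by decide
  have f9 : PySem.List.pyGetD binEdges (9 + 1) 0 = 100 := by decide
  have e10 : PySem.List.pyGetD binEdges 10 0 = 100 := by decide
  have f10 : PySem.List.pyGetD binEdges (10 + 1) 0 = 110 := by decide
  have e11 : PySem.List.pyGetD binEdges 11 0 = 110 := by decide
  have f11 : PySem.List.pyGetD binEdges (11 + 1) 0 = 120 := by decide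
  have e12 : PySem.List.pyGetD binEdges 12 0 = 120 := by decide
  have f12 : PySem.List.pyGetD binEdges (12 + 1) 0 = 130 := by decide
  have e13 : PySem.List.pyGetD binEdges 13 0 = 130 := by decide
  have f13 : PySem.List.pyGetD binEdges (13 + 1) 0 = 140 := by decide
  have e14 : PySem.List.pyGetD binEdges 14 0 = 140 := by decide
  have f14 : PySem.List.pyGetD binEdges (14 + 1) 0 = 150 := by decide
  have e15 : PySem.List.pyGetD binEdges 15 0 = 150 := by decide
  have f15 : PySem.List.pyGetD binEdges (15 + 1) 0 = 160 := by decide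
  have e16 : PySem.List.pyGetD binEdges 16 0 = 160 := by decide
  have f16 : PySem.List.pyGetD binEdges (16 + 1) 0 = 170 := by decide
  have e17 : PySem.List.pyGetD binEdges 17 0 = 170 := by decide
  have f17 : PySem.List.pyGetD binEdges (17 + 1) 0 = 180 := by decide
  have e18 : PySem.List.pyGetD binEdges 18 0 = 180 := by decide
  have f18 : PySem.List.pyGetD binEdges (18 + 1) 0 = 190 := by decide
  have e19 : PySem.List.pyGetD binEdges 19 0 = 190 := by decide
  have f19 : PySem.List.pyGetD binEdges (19 + 1) 0 = 200 := by decide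
  have e20 : PySem.List.pyGetD binEdges 20 0 = 200 := by decide
  have f20 : PySem.List.pyGetD binEdges (20 + 1) 0 = 210 := by decide
  have e21 : PySem.List.pyGetD binEdges 21 0 = 210 := by decide
  have f21 : PySem.List.pyGetD binEdges (21 + 1) 0 = 220 := by decide
  have e22 : PySem.List.pyGetD binEdges 22 0 = 220 := by decide
  have f22 : PySem.List.pyGetD binEdges (22 + 1) 0 = 230 := by decide
  have e23 : PySem.List.pyGetD binEdges 23 0 = 230 := by decide
  have f23 : PySem.List.pyGetD binEdges (23 + 1) 0 = 240 := by decide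
  have e24 : PySem.List.pyGetD binEdges 24 0 = 240 := by decide
  have f24 : PySem.List.pyGetD binEdges (24 + 1) 0 = 250 := by decide
  have e25 : PySem.List.pyGetD binEdges 25 0 = 250 := by decide
  have f25 : PySem.List.pyGetD binEdges (25 + 1) 0 = 256 := by decide
  rw [hr]
  simp only [histInnerA]
  rw [e0, f0, e1, f1, e2, f2, e3, f3, e4, f4, e5, f5, e6, f6, e7, f7, e8, f8, e9, f9, e10, f10, e11, f11, e12, f12, e13, f13, e14, f14, e15, f15, e16, f16, e17, f17, e18, f18, e19, f19, e20, f20, e21, f21, e22, f22, e23, f23, e24, f24, e25, f25]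
  have hB : histStepB bins val =
      (if 0 ≤ val ∧ val < 256 then
        PySem.List.pySetD bins (min (val / 10) 25) (PySem.List.pyGetD bins (min (val / 10) 25) 0 + 1)
      else bins) := by
    simp only [histStepB]
    rw [PySem.Int.floordiv_eq_ediv_of_pos (by norm_num : (0:Int) < 10)]
  rw [hB]
  by_cases h0 : (0:Int) ≤ val ∧ val < 10
  · rw [if_pos h0, if_pos (show (0:Int) ≤ val ∧ val < 256 by omega)]
    exact set_incr_congr _ _ _ (by omega)
  rw [if_neg h0]
  by_cases h1 : (10:Int) ≤ val ∧ val < 20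
  · rw [if_pos h1, if_pos (show (0:Int) ≤ val ∧ val < 256 by omega)]
    exact set_incr_congr _ _ _ (by omega)
  rw [if_neg h1]
  by_cases h2 : (20:Int) ≤ val ∧ val < 30
  · rw [if_pos h2, if_pos (show (0:Int) ≤ val ∧ val < 256 by omega)]
    exact set_incr_congr _ _ _ (by omega)
  rw [if_neg h2]
  by_cases h3 : (30:Int) ≤ val ∧ val < 40
  · rw [if_pos h3, if_pos (show (0:Int) ≤ val ∧ val < 256 by omega)]
    exact set_incr_congr _ _ _ (by omega)
  rw [if_neg h3]
  by_cases h4 : (40:Int) ≤ val ∧ val < 50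
  · rw [if_pos h4, if_pos (show (0:Int) ≤ val ∧ val < 256 by omega)]
    exact set_incr_congr _ _ _ (by omega)
  rw [if_neg h4]
  by_cases h5 : (50:Int) ≤ val ∧ val < 60
  · rw [if_pos h5, if_pos (show (0:Int) ≤ val ∧ val < 256 by omega)]
    exact set_incr_congr _ _ _ (by omega)
  rw [if_neg h5]
  by_cases h6 : (60:Int) ≤ val ∧ val < 70
  · rw [if_pos h6, if_pos (show (0:Int) ≤ val ∧ val < 256 by omega)]
    exact set_incr_congr _ _ _ (by omega)
  rw [if_neg h6]
  by_cases h7 : (70:Int) ≤ val ∧ val < 80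
  · rw [if_pos h7, if_pos (show (0:Int) ≤ val ∧ val < 256 by omega)]
    exact set_incr_congr _ _ _ (by omega)
  rw [if_neg h7]
  by_cases h8 : (80:Int) ≤ val ∧ val < 90
  · rw [if_pos h8, if_pos (show (0:Int) ≤ val ∧ val < 256 by omega)]
    exact set_incr_congr _ _ _ (by omega)
  rw [if_neg h8]
  by_cases h9 : (90:Int) ≤ val ∧ val < 100
  · rw [if_pos h9, if_pos (show (0:Int) ≤ val ∧ val < 256 by omega)]
    exact set_incr_congr _ _ _ (by omega)
  rw [if_neg h9]
  by_cases h10 : (100:Int) ≤ val ∧ val < 110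
  · rw [if_pos h10, if_pos (show (0:Int) ≤ val ∧ val < 256 by omega)]
    exact set_incr_congr _ _ _ (by omega)
  rw [if_neg h10]
  by_cases h11 : (110:Int) ≤ val ∧ val < 120
  · rw [if_pos h11, if_pos (show (0:Int) ≤ val ∧ val < 256 by omega)]
    exact set_incr_congr _ _ _ (by omega)
  rw [if_neg h11]
  by_cases h12 : (120:Int) ≤ val ∧ val < 130
  · rw [if_pos h12, if_pos (show (0:Int) ≤ val ∧ val < 256 by omega)]
    exact set_incr_congr _ _ _ (by omega)
  rw [if_neg h12]
  by_cases h13 : (130:Int) ≤ val ∧ val < 140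
  · rw [if_pos h13, if_pos (show (0:Int) ≤ val ∧ val < 256 by omega)]
    exact set_incr_congr _ _ _ (by omega)
  rw [if_neg h13]
  by_cases h14 : (140:Int) ≤ val ∧ val < 150
  · rw [if_pos h14, if_pos (show (0:Int) ≤ val ∧ val < 256 by omega)]
    exact set_incr_congr _ _ _ (by omega)
  rw [if_neg h14]
  by_cases h15 : (150:Int) ≤ val ∧ val < 160
  · rw [if_pos h15, if_pos (show (0:Int) ≤ val ∧ val < 256 by omega)]
    exact set_incr_congr _ _ _ (by omega)
  rw [if_neg h15]
  by_cases h16 : (160:Int) ≤ val ∧ val < 170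
  · rw [if_pos h16, if_pos (show (0:Int) ≤ val ∧ val < 256 by omega)]
    exact set_incr_congr _ _ _ (by omega)
  rw [if_neg h16]
  by_cases h17 : (170:Int) ≤ val ∧ val < 180
  · rw [if_pos h17, if_pos (show (0:Int) ≤ val ∧ val < 256 by omega)]
    exact set_incr_congr _ _ _ (by omega)
  rw [if_neg h17]
  by_cases h18 : (180:Int) ≤ val ∧ val < 190
  · rw [if_pos h18, if_pos (show (0:Int) ≤ val ∧ val < 256 by omega)]
    exact set_incr_congr _ _ _ (by omega)
  rw [if_neg h18]
  by_cases h19 : (190:Int) ≤ val ∧ val < 200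
  · rw [if_pos h19, if_pos (show (0:Int) ≤ val ∧ val < 256 by omega)]
    exact set_incr_congr _ _ _ (by omega)
  rw [if_neg h19]
  by_cases h20 : (200:Int) ≤ val ∧ val < 210
  · rw [if_pos h20, if_pos (show (0:Int) ≤ val ∧ val < 256 by omega)]
    exact set_incr_congr _ _ _ (by omega)
  rw [if_neg h20]
  by_cases h21 : (210:Int) ≤ val ∧ val < 220
  · rw [if_pos h21, if_pos (show (0:Int) ≤ val ∧ val < 256 by omega)]
    exact set_incr_congr _ _ _ (by omega)
  rw [if_neg h21]
  by_cases h22 : (220:Int) ≤ val ∧ val < 230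
  · rw [if_pos h22, if_pos (show (0:Int) ≤ val ∧ val < 256 by omega)]
    exact set_incr_congr _ _ _ (by omega)
  rw [if_neg h22]
  by_cases h23 : (230:Int) ≤ val ∧ val < 240
  · rw [if_pos h23, if_pos (show (0:Int) ≤ val ∧ val < 256 by omega)]
    exact set_incr_congr _ _ _ (by omega)
  rw [if_neg h23]
  by_cases h24 : (240:Int) ≤ val ∧ val < 250
  · rw [if_pos h24, if_pos (show (0:Int) ≤ val ∧ val < 256 by omega)]
    exact set_incr_congr _ _ _ (by omega)
  rw [if_neg h24]
  by_cases h25 : (250:Int) ≤ val ∧ val < 256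
  · rw [if_pos h25, if_pos (show (0:Int) ≤ val ∧ val < 256 by omega)]
    exact set_incr_congr _ _ _ (by omega)
  rw [if_neg h25]
  rw [if_neg (show ¬((0:Int) ≤ val ∧ val < 256) by omega)]

theorem fold_eq (flat_data : List Int) (bins : List Int) :
    flat_data.foldl (fun bins val => histInnerA bins val (PySem.List.pyRange 0 26 1)) bins
      = flat_data.foldl histStepB bins := by
  simp only [step_eq]

-- ===== VERDICT (by name: the statement is the Claim_ definition above) =====
theorem compute_custom_hist_spec : Claim_equal_compute_custom_hist := by
  intro flat_data _
  unfold Spec_compute_custom_hist compute_custom_hist compute_custom_hist_alt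
  exact fold_eq flat_data _
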